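-- pv_equiv track=rewrite | github.com/RicardoBochnia/EUBW-Researcher | src/eubw_researcher/corpus/normalize.py | _heading_level_for_class
-- ===== SOURCE A (Python) =====
-- from typing import List, Optional, Tuple
--
-- def _heading_level_for_class(class_name: str) -> Optional[int]:
--     tokens = {token.strip().lower() for token in class_name.split() if token.strip()}
--     if "oj-hd-ti" in tokens or "oj-doc-ti" in tokens:
--         return 1
--     if "oj-ti-part" in tokens or "oj-ti-chap" in tokens or "oj-ti-annex" in tokens:
--         return 2
--     if "oj-ti-section-1" in tokens:
--         return 2
--     if "oj-ti-section-2" in tokens: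
--         return 3
--     if "oj-ti-section-3" in tokens:
--         return 4
--     if "oj-ti-art" in tokens:
--         return 3
--     return None
-- ===== SOURCE B (Python) =====
-- _PRIORITY = {
--     "oj-hd-ti": 0,
--     "oj-doc-ti": 1,
--     "oj-ti-part": 2,
--     "oj-ti-chap": 3,
--     "oj-ti-annex": 4,
--     "oj-ti-section-1": 5,
--     "oj-ti-section-2": 6,
--     "oj-ti-section-3": 7,
--     "oj-ti-art": 8,
-- }
-- _LEVELS = [1, 1, 2, 2, 2, 2, 3, 4, 3]
--
--
-- def _heading_level_for_class(class_name):
--     ranks = [_PRIORITY[w] for w in map(str.lower, class_name.split()) if w in _PRIORITY]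
--     if not ranks:
--         return None
--     return _LEVELS[min(ranks)]
-- ===== Notes on version B (the rewrite author's own statement) =====
-- stated objective: alternative
-- what changed: Instead of building a token set and running a six-branch membership if-cascade, B maps each lowercased token to a numeric priority rank through a dict, takes the arithmetic minimum of the ranks, and indexes a level table with it; correctness follows because A's cascade order coincides with ascending rank order, so the first matching branch is the minimum-rank token present.
import Mathlib
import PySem

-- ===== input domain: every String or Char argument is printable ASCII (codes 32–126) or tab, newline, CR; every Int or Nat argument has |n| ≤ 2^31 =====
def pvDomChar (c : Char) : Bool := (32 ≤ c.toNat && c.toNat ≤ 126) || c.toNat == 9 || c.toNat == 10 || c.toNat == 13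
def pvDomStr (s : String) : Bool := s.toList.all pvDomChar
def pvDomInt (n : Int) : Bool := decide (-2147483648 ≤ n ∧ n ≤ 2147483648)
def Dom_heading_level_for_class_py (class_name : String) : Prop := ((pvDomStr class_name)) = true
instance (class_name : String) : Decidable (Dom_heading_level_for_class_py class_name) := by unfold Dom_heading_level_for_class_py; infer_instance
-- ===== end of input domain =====

-- B replaces A's set-plus-if-cascade with an arithmetic reduction: tokens are mapped to
-- numeric priority ranks via a dict, the minimum rank is taken, and a level table is indexed (alternative).


-- ===== PORT A =====
def heading_level_for_class_py (class_name : String) : Option Int :=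
  let tokens : PySem.Set (List Char) :=
    PySem.Set.ofList
      (((PySem.Chars.split₀ class_name.toList).filter
          (fun token => !(PySem.Chars.strip token).isEmpty)).map
        (fun token => PySem.Chars.lower (PySem.Chars.strip token)))
  if tokens.contains "oj-hd-ti".toList || tokens.contains "oj-doc-ti".toList then some 1
  else if tokens.contains "oj-ti-part".toList || tokens.contains "oj-ti-chap".toList ||
      tokens.contains "oj-ti-annex".toList then some 2
  else if tokens.contains "oj-ti-section-1".toList then some 2
  else if tokens.contains "oj-ti-section-2".toList then some 3
  else if tokens.contains "oj-ti-section-3".toList then some 4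
  else if tokens.contains "oj-ti-art".toList then some 3
  else none

-- ===== PORT B =====
def prioDict : PySem.Dict (List Char) Int :=
  PySem.Dict.ofList
    [("oj-hd-ti".toList, 0), ("oj-doc-ti".toList, 1), ("oj-ti-part".toList, 2),
     ("oj-ti-chap".toList, 3), ("oj-ti-annex".toList, 4), ("oj-ti-section-1".toList, 5),
     ("oj-ti-section-2".toList, 6), ("oj-ti-section-3".toList, 7), ("oj-ti-art".toList, 8)]

def levelsList : List Int := [1, 1, 2, 2, 2, 2, 3, 4, 3]

def heading_level_for_class_py_alt (class_name : String) : Option Int :=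
  let ranks : List Int :=
    ((PySem.Chars.split₀ class_name.toList).map PySem.Chars.lower).filterMap
      (fun w => prioDict.get? w)
  if ranks.isEmpty then none
  else
    match PySem.List.min? ranks (fun x => x) with
    | none => none   -- unreachable: ranks is nonempty
    | some m => PySem.List.pyGet? levelsList m   -- min rank is 0..8, always in range

-- ===== PRECONDITION & SPEC =====
def Spec_heading_level_for_class_py (class_name : String) (out : Option Int) : Prop := out = heading_level_for_class_py_alt class_name
instance (class_name : String) (out : Option Int) : Decidable (Spec_heading_level_for_class_py class_name out) := by unfold Spec_heading_level_for_class_py; infer_instance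

-- ===== CLAIM (what is proved, stated in full; the proofs are below) =====
def Claim_equal_heading_level_for_class_py : Prop := ∀ (class_name : String), Dom_heading_level_for_class_py class_name → Spec_heading_level_for_class_py class_name (heading_level_for_class_py class_name)

-- ===== LEMMAS AND PROOFS =====

-- Every word produced by str.split() is nonempty and contains no whitespace.
theorem split₀_go_words (s : List Char) (cur : List Char) (acc : List (List Char))
    (hcur : ∀ c ∈ cur, PySem.Chars.isspace c = false)
    (hacc : ∀ t ∈ acc, t ≠ [] ∧ ∀ c ∈ t, PySem.Chars.isspace c = false) :
    ∀ t ∈ PySem.Chars.split₀.go s cur acc, t ≠ [] ∧ ∀ c ∈ t, PySem.Chars.isspace c = false := by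
  induction s generalizing cur acc with
  | nil =>
    intro t ht
    simp only [PySem.Chars.split₀.go] at ht
    split at ht
    · exact hacc t (List.mem_reverse.mp ht)
    · rcases List.mem_cons.mp (List.mem_reverse.mp ht) with h | h
      · subst h
        rename_i hne
        constructor
        · simpa [List.isEmpty_iff] using hne
        · intro c hc; exact hcur c (List.mem_reverse.mp hc)
      · exact hacc t h
  | cons c rest ih =>
    intro t ht
    simp only [PySem.Chars.split₀.go] at ht
    by_cases hsp : PySem.Chars.isspace c = true
    · simp only [hsp, if_true] at ht
      split at ht
      · exact ih [] acc (by simp) hacc t ht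
      · refine ih [] (cur.reverse :: acc) (by simp) ?_ t ht
        intro u hu
        rcases List.mem_cons.mp hu with h | h
        · subst h
          rename_i hne
          exact ⟨by simpa [List.isEmpty_iff] using hne,
                 fun d hd => hcur d (List.mem_reverse.mp hd)⟩
        · exact hacc u h
    · simp only [hsp] at ht
      refine ih (c :: cur) acc ?_ hacc t ht
      intro d hd
      rcases List.mem_cons.mp hd with h | h
      · simpa [h] using hsp
      · exact hcur d h

theorem split₀_words (cs : List Char) :
    ∀ t ∈ PySem.Chars.split₀ cs, t ≠ [] ∧ ∀ c ∈ t, PySem.Chars.isspace c = false := by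
  simpa [PySem.Chars.split₀] using split₀_go_words cs [] [] (by simp) (by simp)

theorem dropWhile_isspace_id (t : List Char) (h : ∀ c ∈ t, PySem.Chars.isspace c = false) :
    List.dropWhile PySem.Chars.isspace t = t := by
  cases t with
  | nil => rfl
  | cons c rest => simp [h c (by simp)]

theorem strip_id (t : List Char) (h : ∀ c ∈ t, PySem.Chars.isspace c = false) :
    PySem.Chars.strip t = t := by
  have h1 : PySem.Chars.lstrip t = t := dropWhile_isspace_id t h
  simp only [PySem.Chars.strip, PySem.Chars.rstrip, h1]
  rw [dropWhile_isspace_id t.reverse (fun c hc => h c (List.mem_reverse.mp hc)), List.reverse_reverse]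

-- A's stripped/filtered comprehension list IS the list of lowered words.
theorem tokenlist_eq (cs : List Char) :
    ((PySem.Chars.split₀ cs).filter (fun token => !(PySem.Chars.strip token).isEmpty)).map
        (fun token => PySem.Chars.lower (PySem.Chars.strip token))
      = (PySem.Chars.split₀ cs).map PySem.Chars.lower := by
  have hw := split₀_words cs
  have hf : (PySem.Chars.split₀ cs).filter (fun token => !(PySem.Chars.strip token).isEmpty)
      = PySem.Chars.split₀ cs := by
    apply List.filter_eq_self.mpr
    intro t ht
    rcases hw t ht with ⟨hne, hns⟩
    simp [strip_id t hns, hne]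
  rw [hf]
  apply List.map_congr_left
  intro t ht
  rw [strip_id t (hw t ht).2]

theorem contains_ofList {α : Type} [BEq α] [LawfulBEq α] (l : List α) (x : α) :
    PySem.Set.contains (PySem.Set.ofList l) x = l.contains x := by
  rw [Bool.eq_iff_iff]
  simp [PySem.Set.mem_ofList]

-- The priority dict hit on w, characterized: w is the i-th key and the value is i.
theorem get?_prio_iff (w : List Char) (r : Int) :
    prioDict.get? w = some r ↔
      (w = ['o', 'j', '-', 'h', 'd', '-', 't', 'i'] ∧ r = 0) ∨
      (w = ['o', 'j', '-', 'd', 'o', 'c', '-', 't', 'i'] ∧ r = 1) ∨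
      (w = ['o', 'j', '-', 't', 'i', '-', 'p', 'a', 'r', 't'] ∧ r = 2) ∨
      (w = ['o', 'j', '-', 't', 'i', '-', 'c', 'h', 'a', 'p'] ∧ r = 3) ∨
      (w = ['o', 'j', '-', 't', 'i', '-', 'a', 'n', 'n', 'e', 'x'] ∧ r = 4) ∨
      (w = ['o', 'j', '-', 't', 'i', '-', 's', 'e', 'c', 't', 'i', 'o', 'n', '-', '1'] ∧ r = 5) ∨
      (w = ['o', 'j', '-', 't', 'i', '-', 's', 'e', 'c', 't', 'i', 'o', 'n', '-', '2'] ∧ r = 6) ∨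
      (w = ['o', 'j', '-', 't', 'i', '-', 's', 'e', 'c', 't', 'i', 'o', 'n', '-', '3'] ∧ r = 7) ∨
      (w = ['o', 'j', '-', 't', 'i', '-', 'a', 'r', 't'] ∧ r = 8) := by
  have hmk : prioDict = PySem.Dict.mk
      [(['o', 'j', '-', 'h', 'd', '-', 't', 'i'], 0),
       (['o', 'j', '-', 'd', 'o', 'c', '-', 't', 'i'], 1),
       (['o', 'j', '-', 't', 'i', '-', 'p', 'a', 'r', 't'], 2),
       (['o', 'j', '-', 't', 'i', '-', 'c', 'h', 'a', 'p'], 3),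
       (['o', 'j', '-', 't', 'i', '-', 'a', 'n', 'n', 'e', 'x'], 4),
       (['o', 'j', '-', 't', 'i', '-', 's', 'e', 'c', 't', 'i', 'o', 'n', '-', '1'], 5),
       (['o', 'j', '-', 't', 'i', '-', 's', 'e', 'c', 't', 'i', 'o', 'n', '-', '2'], 6),
       (['o', 'j', '-', 't', 'i', '-', 's', 'e', 'c', 't', 'i', 'o', 'n', '-', '3'], 7),
       (['o', 'j', '-', 't', 'i', '-', 'a', 'r', 't'], 8)] := by
    decide
  rw [hmk]
  simp only [PySem.Dict.get?_mk_cons, PySem.Dict.get?_empty, beq_iff_eq]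
  split_ifs with e0 e1 e2 e3 e4 e5 e6 e7 e8
  · subst e0
    constructor
    · intro h
      refine Or.inl ⟨rfl, ?_⟩
      injection h with h
      exact h.symm
    · rintro (⟨hw, rfl⟩|⟨hw, rfl⟩|⟨hw, rfl⟩|⟨hw, rfl⟩|⟨hw, rfl⟩|⟨hw, rfl⟩|⟨hw, rfl⟩|⟨hw, rfl⟩|⟨hw, rfl⟩) <;>
        first | rfl | exact absurd hw (by decide)
  · subst e1
    constructor
    · intro h
      refine Or.inr (Or.inl ⟨rfl, ?_⟩)
      injection h with h
      exact h.symm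
    · rintro (⟨hw, rfl⟩|⟨hw, rfl⟩|⟨hw, rfl⟩|⟨hw, rfl⟩|⟨hw, rfl⟩|⟨hw, rfl⟩|⟨hw, rfl⟩|⟨hw, rfl⟩|⟨hw, rfl⟩) <;>
        first | rfl | exact absurd hw (by decide)
  · subst e2
    constructor
    · intro h
      refine Or.inr (Or.inr (Or.inl ⟨rfl, ?_⟩))
      injection h with h
      exact h.symm
    · rintro (⟨hw, rfl⟩|⟨hw, rfl⟩|⟨hw, rfl⟩|⟨hw, rfl⟩|⟨hw, rfl⟩|⟨hw, rfl⟩|⟨hw, rfl⟩|⟨hw, rfl⟩|⟨hw, rfl⟩) <;>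
        first | rfl | exact absurd hw (by decide)
  · subst e3
    constructor
    · intro h
      refine Or.inr (Or.inr (Or.inr (Or.inl ⟨rfl, ?_⟩)))
      injection h with h
      exact h.symm
    · rintro (⟨hw, rfl⟩|⟨hw, rfl⟩|⟨hw, rfl⟩|⟨hw, rfl⟩|⟨hw, rfl⟩|⟨hw, rfl⟩|⟨hw, rfl⟩|⟨hw, rfl⟩|⟨hw, rfl⟩) <;>
        first | rfl | exact absurd hw (by decide)
  · subst e4
    constructor
    · intro h
      refine Or.inr (Or.inr (Or.inr (Or.inr (Or.inl ⟨rfl, ?_⟩))))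
      injection h with h
      exact h.symm
    · rintro (⟨hw, rfl⟩|⟨hw, rfl⟩|⟨hw, rfl⟩|⟨hw, rfl⟩|⟨hw, rfl⟩|⟨hw, rfl⟩|⟨hw, rfl⟩|⟨hw, rfl⟩|⟨hw, rfl⟩) <;>
        first | rfl | exact absurd hw (by decide)
  · subst e5
    constructor
    · intro h
      refine Or.inr (Or.inr (Or.inr (Or.inr (Or.inr (Or.inl ⟨rfl, ?_⟩)))))
      injection h with h
      exact h.symm
    · rintro (⟨hw, rfl⟩|⟨hw, rfl⟩|⟨hw, rfl⟩|⟨hw, rfl⟩|⟨hw, rfl⟩|⟨hw, rfl⟩|⟨hw, rfl⟩|⟨hw, rfl⟩|⟨hw, rfl⟩) <;>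
        first | rfl | exact absurd hw (by decide)
  · subst e6
    constructor
    · intro h
      refine Or.inr (Or.inr (Or.inr (Or.inr (Or.inr (Or.inr (Or.inl ⟨rfl, ?_⟩))))))
      injection h with h
      exact h.symm
    · rintro (⟨hw, rfl⟩|⟨hw, rfl⟩|⟨hw, rfl⟩|⟨hw, rfl⟩|⟨hw, rfl⟩|⟨hw, rfl⟩|⟨hw, rfl⟩|⟨hw, rfl⟩|⟨hw, rfl⟩) <;>
        first | rfl | exact absurd hw (by decide)
  · subst e7
    constructor
    · intro h
      refine Or.inr (Or.inr (Or.inr (Or.inr (Or.inr (Or.inr (Or.inr (Or.inl ⟨rfl, ?_⟩)))))))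
      injection h with h
      exact h.symm
    · rintro (⟨hw, rfl⟩|⟨hw, rfl⟩|⟨hw, rfl⟩|⟨hw, rfl⟩|⟨hw, rfl⟩|⟨hw, rfl⟩|⟨hw, rfl⟩|⟨hw, rfl⟩|⟨hw, rfl⟩) <;>
        first | rfl | exact absurd hw (by decide)
  · subst e8
    constructor
    · intro h
      refine Or.inr (Or.inr (Or.inr (Or.inr (Or.inr (Or.inr (Or.inr (Or.inr (⟨rfl, ?_⟩))))))))
      injection h with h
      exact h.symm
    · rintro (⟨hw, rfl⟩|⟨hw, rfl⟩|⟨hw, rfl⟩|⟨hw, rfl⟩|⟨hw, rfl⟩|⟨hw, rfl⟩|⟨hw, rfl⟩|⟨hw, rfl⟩|⟨hw, rfl⟩) <;>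
        first | rfl | exact absurd hw (by decide)
  · constructor
    · intro h; cases h
    · rintro (⟨hw, rfl⟩|⟨hw, rfl⟩|⟨hw, rfl⟩|⟨hw, rfl⟩|⟨hw, rfl⟩|⟨hw, rfl⟩|⟨hw, rfl⟩|⟨hw, rfl⟩|⟨hw, rfl⟩)
      · exact absurd hw.symm e0
      · exact absurd hw.symm e1
      · exact absurd hw.symm e2
      · exact absurd hw.symm e3
      · exact absurd hw.symm e4
      · exact absurd hw.symm e5
      · exact absurd hw.symm e6
      · exact absurd hw.symm e7
      · exact absurd hw.symm e8

-- Membership in B's rank list, in terms of A's membership tests.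
theorem mem_ranks_iff (toks : List (List Char)) (r : Int) :
    r ∈ toks.filterMap (fun w => prioDict.get? w) ↔
      (['o', 'j', '-', 'h', 'd', '-', 't', 'i'] ∈ toks ∧ r = 0) ∨
      (['o', 'j', '-', 'd', 'o', 'c', '-', 't', 'i'] ∈ toks ∧ r = 1) ∨
      (['o', 'j', '-', 't', 'i', '-', 'p', 'a', 'r', 't'] ∈ toks ∧ r = 2) ∨
      (['o', 'j', '-', 't', 'i', '-', 'c', 'h', 'a', 'p'] ∈ toks ∧ r = 3) ∨
      (['o', 'j', '-', 't', 'i', '-', 'a', 'n', 'n', 'e', 'x'] ∈ toks ∧ r = 4) ∨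
      (['o', 'j', '-', 't', 'i', '-', 's', 'e', 'c', 't', 'i', 'o', 'n', '-', '1'] ∈ toks ∧ r = 5) ∨
      (['o', 'j', '-', 't', 'i', '-', 's', 'e', 'c', 't', 'i', 'o', 'n', '-', '2'] ∈ toks ∧ r = 6) ∨
      (['o', 'j', '-', 't', 'i', '-', 's', 'e', 'c', 't', 'i', 'o', 'n', '-', '3'] ∈ toks ∧ r = 7) ∨
      (['o', 'j', '-', 't', 'i', '-', 'a', 'r', 't'] ∈ toks ∧ r = 8) := by
  simp only [List.mem_filterMap]
  constructor
  · rintro ⟨w, hw, hg⟩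
    rcases (get?_prio_iff w r).mp hg with ⟨rfl, rfl⟩|⟨rfl, rfl⟩|⟨rfl, rfl⟩|⟨rfl, rfl⟩|⟨rfl, rfl⟩|⟨rfl, rfl⟩|⟨rfl, rfl⟩|⟨rfl, rfl⟩|⟨rfl, rfl⟩ <;> simp_all
  · rintro (⟨hw, rfl⟩|⟨hw, rfl⟩|⟨hw, rfl⟩|⟨hw, rfl⟩|⟨hw, rfl⟩|⟨hw, rfl⟩|⟨hw, rfl⟩|⟨hw, rfl⟩|⟨hw, rfl⟩) <;>
      exact ⟨_, hw, by decide⟩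

-- min(ranks) is the provably least member.
theorem min?_id_eq_some (R : List Int) (m : Int) (hm : m ∈ R) (hle : ∀ r ∈ R, m ≤ r) :
    PySem.List.min? R (fun x => x) = some m := by
  cases h : PySem.List.min? R (fun x => x) with
  | none =>
    rw [PySem.List.min?_eq_none_iff R (fun x => x)] at h
    subst h; cases hm
  | some m' =>
    have h1 := PySem.List.min?_mem h
    have h2 := PySem.List.min?_isMin h m hm
    have h3 := hle m' h1
    have h4 : m' ≤ m := h2
    exact congrArg some (le_antisymm h4 h3)

theorem isEmpty_false_of_min? (R : List Int) (m : Int)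
    (h : PySem.List.min? R (fun x => x) = some m) : R.isEmpty = false := by
  cases he : R.isEmpty
  · rfl
  · rw [(PySem.List.min?_eq_none_iff R (fun x => x)).mpr (List.isEmpty_iff.mp he)] at h
    cases h

-- ===== VERDICT (by name: the statement is the Claim_ definition above) =====
set_option maxHeartbeats 2000000 in
theorem heading_level_for_class_py_spec : Claim_equal_heading_level_for_class_py := by
  intro class_name _
  unfold Spec_heading_level_for_class_py heading_level_for_class_py heading_level_for_class_py_alt
  simp only [tokenlist_eq, contains_ofList]
  set toks := (PySem.Chars.split₀ class_name.toList).map PySem.Chars.lower with htoks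
  set ranks := toks.filterMap (fun w => prioDict.get? w) with hranks
  have hmem : ∀ r : Int, r ∈ ranks ↔ _ := fun r => mem_ranks_iff toks r
  by_cases h0 : ['o', 'j', '-', 'h', 'd', '-', 't', 'i'] ∈ toks
  · have hmin : PySem.List.min? ranks (fun x => x) = some 0 := by
      refine min?_id_eq_some _ _ ((hmem 0).mpr (Or.inl ⟨h0, rfl⟩)) ?_
      intro r hr
      rcases (hmem r).mp hr with ⟨h,rfl⟩|⟨h,rfl⟩|⟨h,rfl⟩|⟨h,rfl⟩|⟨h,rfl⟩|⟨h,rfl⟩|⟨h,rfl⟩|⟨h,rfl⟩|⟨h,rfl⟩ <;> first | omega | exact absurd h (by assumption)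
    have hne := isEmpty_false_of_min? ranks 0 hmin
    simp [h0, hne, hmin, PySem.List.pyGet?, PySem.List.pyIdx?, levelsList]
    try decide
  by_cases h1 : ['o', 'j', '-', 'd', 'o', 'c', '-', 't', 'i'] ∈ toks
  · have hmin : PySem.List.min? ranks (fun x => x) = some 1 := by
      refine min?_id_eq_some _ _ ((hmem 1).mpr (Or.inr (Or.inl ⟨h1, rfl⟩))) ?_
      intro r hr
      rcases (hmem r).mp hr with ⟨h,rfl⟩|⟨h,rfl⟩|⟨h,rfl⟩|⟨h,rfl⟩|⟨h,rfl⟩|⟨h,rfl⟩|⟨h,rfl⟩|⟨h,rfl⟩|⟨h,rfl⟩ <;> first | omega | exact absurd h (by assumption)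
    have hne := isEmpty_false_of_min? ranks 1 hmin
    simp [h0, h1, hne, hmin, PySem.List.pyGet?, PySem.List.pyIdx?, levelsList]
    try decide
  by_cases h2 : ['o', 'j', '-', 't', 'i', '-', 'p', 'a', 'r', 't'] ∈ toks
  · have hmin : PySem.List.min? ranks (fun x => x) = some 2 := by
      refine min?_id_eq_some _ _ ((hmem 2).mpr (Or.inr (Or.inr (Or.inl ⟨h2, rfl⟩)))) ?_
      intro r hr
      rcases (hmem r).mp hr with ⟨h,rfl⟩|⟨h,rfl⟩|⟨h,rfl⟩|⟨h,rfl⟩|⟨h,rfl⟩|⟨h,rfl⟩|⟨h,rfl⟩|⟨h,rfl⟩|⟨h,rfl⟩ <;> first | omega | exact absurd h (by assumption)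
    have hne := isEmpty_false_of_min? ranks 2 hmin
    simp [h0, h1, h2, hne, hmin, PySem.List.pyGet?, PySem.List.pyIdx?, levelsList]
    try decide
  by_cases h3 : ['o', 'j', '-', 't', 'i', '-', 'c', 'h', 'a', 'p'] ∈ toks
  · have hmin : PySem.List.min? ranks (fun x => x) = some 3 := by
      refine min?_id_eq_some _ _ ((hmem 3).mpr (Or.inr (Or.inr (Or.inr (Or.inl ⟨h3, rfl⟩))))) ?_
      intro r hr
      rcases (hmem r).mp hr with ⟨h,rfl⟩|⟨h,rfl⟩|⟨h,rfl⟩|⟨h,rfl⟩|⟨h,rfl⟩|⟨h,rfl⟩|⟨h,rfl⟩|⟨h,rfl⟩|⟨h,rfl⟩ <;> first | omega | exact absurd h (by assumption)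
    have hne := isEmpty_false_of_min? ranks 3 hmin
    simp [h0, h1, h2, h3, hne, hmin, PySem.List.pyGet?, PySem.List.pyIdx?, levelsList]
    try decide
  by_cases h4 : ['o', 'j', '-', 't', 'i', '-', 'a', 'n', 'n', 'e', 'x'] ∈ toks
  · have hmin : PySem.List.min? ranks (fun x => x) = some 4 := by
      refine min?_id_eq_some _ _ ((hmem 4).mpr (Or.inr (Or.inr (Or.inr (Or.inr (Or.inl ⟨h4, rfl⟩)))))) ?_
      intro r hr
      rcases (hmem r).mp hr with ⟨h,rfl⟩|⟨h,rfl⟩|⟨h,rfl⟩|⟨h,rfl⟩|⟨h,rfl⟩|⟨h,rfl⟩|⟨h,rfl⟩|⟨h,rfl⟩|⟨h,rfl⟩ <;> first | omega | exact absurd h (by assumption)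
    have hne := isEmpty_false_of_min? ranks 4 hmin
    simp [h0, h1, h2, h3, h4, hne, hmin, PySem.List.pyGet?, PySem.List.pyIdx?, levelsList]
    try decide
  by_cases h5 : ['o', 'j', '-', 't', 'i', '-', 's', 'e', 'c', 't', 'i', 'o', 'n', '-', '1'] ∈ toks
  · have hmin : PySem.List.min? ranks (fun x => x) = some 5 := by
      refine min?_id_eq_some _ _ ((hmem 5).mpr (Or.inr (Or.inr (Or.inr (Or.inr (Or.inr (Or.inl ⟨h5, rfl⟩))))))) ?_
      intro r hr
      rcases (hmem r).mp hr with ⟨h,rfl⟩|⟨h,rfl⟩|⟨h,rfl⟩|⟨h,rfl⟩|⟨h,rfl⟩|⟨h,rfl⟩|⟨h,rfl⟩|⟨h,rfl⟩|⟨h,rfl⟩ <;> first | omega | exact absurd h (by assumption)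
    have hne := isEmpty_false_of_min? ranks 5 hmin
    simp [h0, h1, h2, h3, h4, h5, hne, hmin, PySem.List.pyGet?, PySem.List.pyIdx?, levelsList]
    try decide
  by_cases h6 : ['o', 'j', '-', 't', 'i', '-', 's', 'e', 'c', 't', 'i', 'o', 'n', '-', '2'] ∈ toks
  · have hmin : PySem.List.min? ranks (fun x => x) = some 6 := by
      refine min?_id_eq_some _ _ ((hmem 6).mpr (Or.inr (Or.inr (Or.inr (Or.inr (Or.inr (Or.inr (Or.inl ⟨h6, rfl⟩)))))))) ?_
      intro r hr
      rcases (hmem r).mp hr with ⟨h,rfl⟩|⟨h,rfl⟩|⟨h,rfl⟩|⟨h,rfl⟩|⟨h,rfl⟩|⟨h,rfl⟩|⟨h,rfl⟩|⟨h,rfl⟩|⟨h,rfl⟩ <;> first | omega | exact absurd h (by assumption)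
    have hne := isEmpty_false_of_min? ranks 6 hmin
    simp [h0, h1, h2, h3, h4, h5, h6, hne, hmin, PySem.List.pyGet?, PySem.List.pyIdx?, levelsList]
    try decide
  by_cases h7 : ['o', 'j', '-', 't', 'i', '-', 's', 'e', 'c', 't', 'i', 'o', 'n', '-', '3'] ∈ toks
  · have hmin : PySem.List.min? ranks (fun x => x) = some 7 := by
      refine min?_id_eq_some _ _ ((hmem 7).mpr (Or.inr (Or.inr (Or.inr (Or.inr (Or.inr (Or.inr (Or.inr (Or.inl ⟨h7, rfl⟩))))))))) ?_
      intro r hr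
      rcases (hmem r).mp hr with ⟨h,rfl⟩|⟨h,rfl⟩|⟨h,rfl⟩|⟨h,rfl⟩|⟨h,rfl⟩|⟨h,rfl⟩|⟨h,rfl⟩|⟨h,rfl⟩|⟨h,rfl⟩ <;> first | omega | exact absurd h (by assumption)
    have hne := isEmpty_false_of_min? ranks 7 hmin
    simp [h0, h1, h2, h3, h4, h5, h6, h7, hne, hmin, PySem.List.pyGet?, PySem.List.pyIdx?, levelsList]
    try decide
  by_cases h8 : ['o', 'j', '-', 't', 'i', '-', 'a', 'r', 't'] ∈ toks
  · have hmin : PySem.List.min? ranks (fun x => x) = some 8 := by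
      refine min?_id_eq_some _ _ ((hmem 8).mpr (Or.inr (Or.inr (Or.inr (Or.inr (Or.inr (Or.inr (Or.inr (Or.inr (⟨h8, rfl⟩)))))))))) ?_
      intro r hr
      rcases (hmem r).mp hr with ⟨h,rfl⟩|⟨h,rfl⟩|⟨h,rfl⟩|⟨h,rfl⟩|⟨h,rfl⟩|⟨h,rfl⟩|⟨h,rfl⟩|⟨h,rfl⟩|⟨h,rfl⟩ <;> first | omega | exact absurd h (by assumption)
    have hne := isEmpty_false_of_min? ranks 8 hmin
    simp [h0, h1, h2, h3, h4, h5, h6, h7, h8, hne, hmin, PySem.List.pyGet?, PySem.List.pyIdx?, levelsList]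
    try decide
  have hnil : ranks = [] := by
    refine List.eq_nil_iff_forall_not_mem.mpr ?_
    intro r hr
    rcases (hmem r).mp hr with ⟨h,rfl⟩|⟨h,rfl⟩|⟨h,rfl⟩|⟨h,rfl⟩|⟨h,rfl⟩|⟨h,rfl⟩|⟨h,rfl⟩|⟨h,rfl⟩|⟨h,rfl⟩ <;> exact absurd h (by assumption)
  simp [h0, h1, h2, h3, h4, h5, h6, h7, h8, hnil]
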